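-- pv_equiv track=rewrite | github.com/rogue-agent1/bigint | bigint.py | _sub_abs
-- ===== SOURCE A (Python) =====
-- def _sub_abs(a, b):  # a >= b
--     r, borrow = [], 0
--     for i in range(len(a)):
--         d = a[i] - borrow - (b[i] if i < len(b) else 0)
--         if d < 0: d += 10; borrow = 1
--         else: borrow = 0
--         r.append(d)
--     while len(r) > 1 and r[-1] == 0: r.pop()
--     return r
-- ===== SOURCE B (Python) =====
-- def _sub_abs(a, b):  # a >= b
--     e = [x - y for x, y in zip(a, b + [0] * (len(a) - len(b)))]
--     negs = []
--     neg = False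
--     for x in e:
--         negs.append(1 if neg else 0)
--         if x != 0:
--             neg = x < 0
--     r = [x - n + (10 if x - n < 0 else 0) for x, n in zip(e, negs)]
--     i = len(r)
--     while i > 1 and r[i - 1] == 0:
--         i -= 1
--     return r[:i]
-- ===== Notes on version B (the rewrite author's own statement) =====
-- stated objective: alternative
-- what changed: A's single fused loop tests the running subtraction result to set the borrow and then destructively pops trailing zeros; B works in separate passes: a zipped difference array, borrow flags derived from the sign of the most recent non-zero difference (a different borrow rule), a comprehension producing the digits, and a computed index slice instead of pops.
import Mathlib
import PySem

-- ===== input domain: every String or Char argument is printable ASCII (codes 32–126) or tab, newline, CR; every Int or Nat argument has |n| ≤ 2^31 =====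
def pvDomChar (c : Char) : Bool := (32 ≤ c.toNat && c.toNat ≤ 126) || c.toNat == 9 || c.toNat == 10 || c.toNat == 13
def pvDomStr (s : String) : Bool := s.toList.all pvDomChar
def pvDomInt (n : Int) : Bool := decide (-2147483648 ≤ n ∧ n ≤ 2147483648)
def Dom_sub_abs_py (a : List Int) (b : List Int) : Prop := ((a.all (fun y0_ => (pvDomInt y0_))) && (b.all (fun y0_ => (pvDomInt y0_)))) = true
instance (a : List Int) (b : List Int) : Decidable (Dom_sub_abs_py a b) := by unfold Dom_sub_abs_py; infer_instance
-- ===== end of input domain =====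

-- B replaces A's fused borrow loop (borrow from the sign of the running subtraction,
-- destructive trailing-zero pops) by separate passes: a difference array, borrow flags from
-- the sign of the most recent non-zero difference, a digit map, and an index slice; objective:
-- an alternative decomposition of the same O(n) work.

-- ===== PORT A =====
-- 'for i in range(len(a))' reads a[i] and (b[i] if i < len(b) else 0) and threads 'borrow';
-- ported as the structural recursion that consumes a and b in step (same values, same order).
def subLoopA : List Int → List Int → Int → List Int
  | [], _, _ => []
  | x :: a', b, borrow =>
      let d := x - borrow - (match b with | [] => 0 | y :: _ => y)
      if d < 0 then (d + 10) :: subLoopA a' b.tail 1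
      else d :: subLoopA a' b.tail 0

-- 'while len(r) > 1 and r[-1] == 0: r.pop()'  (r[-1] via getLastD; pop = dropLast)
def stripA (r : List Int) : List Int :=
  if 1 < r.length ∧ r.getLastD 1 = 0 then stripA r.dropLast else r
termination_by r.length
decreasing_by simp_all [List.length_dropLast]; omega

def sub_abs_py (a : List Int) (b : List Int) : List Int := stripA (subLoopA a b 0)

-- ===== PORT B =====
-- '[x - y for x, y in zip(a, b + [0] * (len(a) - len(b)))]' (Nat subtraction = Python's
-- max(0, len(a)-len(b)) since a negative repeat count gives the empty list)
def diffB (a b : List Int) : List Int :=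
  (a.zip (b ++ List.replicate (a.length - b.length) 0)).map (fun p => p.1 - p.2)

-- the 'negs' pass: append the current flag, then update it on a non-zero difference
def negsB : List Int → Bool → List Int
  | [], _ => []
  | x :: t, neg => (if neg then (1 : Int) else 0) :: negsB t (if x ≠ 0 then decide (x < 0) else neg)

-- 'i = len(r); while i > 1 and r[i - 1] == 0: i -= 1'
def stripIB (r : List Int) (i : Nat) : Nat :=
  if 1 < i ∧ r.getD (i - 1) 1 = 0 then stripIB r (i - 1) else i
termination_by i
decreasing_by omega

def sub_abs_py_alt (a : List Int) (b : List Int) : List Int :=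
  let e := diffB a b
  let negs := negsB e false
  let r := (e.zip negs).map (fun p => p.1 - p.2 + (if p.1 - p.2 < 0 then 10 else 0))
  r.take (stripIB r r.length)

-- ===== PRECONDITION & SPEC =====
def Spec_sub_abs_py (a : List Int) (b : List Int) (out : List Int) : Prop := out = sub_abs_py_alt a b
instance (a : List Int) (b : List Int) (out : List Int) : Decidable (Spec_sub_abs_py a b out) := by unfold Spec_sub_abs_py; infer_instance

-- ===== CLAIM (what is proved, stated in full; the proofs are below) =====
def Claim_equal_sub_abs_py : Prop := ∀ (a : List Int) (b : List Int), Dom_sub_abs_py a b → Spec_sub_abs_py a b (sub_abs_py a b)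

-- ===== LEMMAS AND PROOFS =====

-- head of b, 0 when b is empty (the value A's loop subtracts at each step)
def headD : List Int → Int
  | [] => 0
  | z :: _ => z

lemma subLoopA_cons (x c : Int) (a' b : List Int) :
    subLoopA (x :: a') b c =
      if x - c - headD b < 0 then (x - c - headD b + 10) :: subLoopA a' b.tail 1
      else (x - c - headD b) :: subLoopA a' b.tail 0 := by
  cases b <;> rfl

lemma diffB_cons (x : Int) (a' b : List Int) :
    diffB (x :: a') b = (x - headD b) :: diffB a' b.tail := by
  cases b with
  | nil => simp [diffB, headD, List.replicate_succ]
  | cons y b' => simp [diffB, headD, Nat.succ_sub_succ]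

lemma borrow_eq (x y : Int) (neg : Bool) :
    decide (x - (if neg then (1 : Int) else 0) - y < 0) =
      (if x - y ≠ 0 then decide (x - y < 0) else neg) := by
  cases neg <;> by_cases h : x - y = 0 <;> simp [h] <;> omega

lemma loop_eq : ∀ (a b : List Int) (neg : Bool),
    subLoopA a b (if neg then 1 else 0) =
      ((diffB a b).zip (negsB (diffB a b) neg)).map
        (fun p => p.1 - p.2 + (if p.1 - p.2 < 0 then 10 else 0)) := by
  intro a
  induction a with
  | nil => intro b neg; simp [subLoopA, diffB, negsB]
  | cons x a' ih =>
      intro b neg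
      rw [diffB_cons]
      simp only [negsB, List.zip_cons_cons, List.map_cons]
      have hA : subLoopA (x :: a') b (if neg then 1 else 0) =
          (if x - (if neg then 1 else 0) - headD b < 0
             then x - (if neg then 1 else 0) - headD b + 10
             else x - (if neg then 1 else 0) - headD b) ::
            subLoopA a' b.tail (if x - (if neg then 1 else 0) - headD b < 0 then 1 else 0) := by
        rw [subLoopA_cons]
        by_cases hd : x - (if neg then 1 else 0) - headD b < 0 <;> simp [hd]
      rw [hA]
      congr 1
      · -- heads
        have he : x - headD b - (if neg then (1 : Int) else 0)
            = x - (if neg then 1 else 0) - headD b := by ring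
        rw [he]
        by_cases hd : x - (if neg then 1 else 0) - headD b < 0 <;> simp [hd]
      · -- tails
        have hb := borrow_eq x (headD b) neg
        have hcond : (if x - (if neg then 1 else 0) - headD b < 0 then (1 : Int) else 0)
            = if (if x - headD b ≠ 0 then decide (x - headD b < 0) else neg) then 1 else 0 := by
          rw [← hb]
          by_cases hd : x - (if neg then 1 else 0) - headD b < 0 <;> simp [hd]
        rw [hcond]
        exact ih b.tail (if x - headD b ≠ 0 then decide (x - headD b < 0) else neg)

lemma getLastD_eq_getD (r : List Int) :
    r.getLastD 1 = r.getD (r.length - 1) 1 := by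
  rw [List.getLastD_eq_getLast?, List.getLast?_eq_getElem?, List.getD_eq_getElem?_getD]

lemma stripIB_le (r : List Int) : ∀ i, stripIB r i ≤ i := by
  intro i
  induction i using Nat.strong_induction_on with
  | _ i ih =>
      rw [stripIB]
      split
      · next h => exact le_trans (ih (i - 1) (by omega)) (by omega)
      · exact le_refl i

lemma getD_dropLast (r : List Int) (j : Nat) (hj : j < r.length - 1) :
    r.dropLast.getD j 1 = r.getD j 1 := by
  rw [List.getD_eq_getElem?_getD, List.getD_eq_getElem?_getD, List.getElem?_dropLast]
  simp [hj]

lemma stripIB_dropLast (r : List Int) : ∀ i, i ≤ r.length - 1 →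
    stripIB r.dropLast i = stripIB r i := by
  intro i
  induction i using Nat.strong_induction_on with
  | _ i ih =>
      intro hi
      by_cases h1 : 1 < i
      · have hget : r.dropLast.getD (i - 1) 1 = r.getD (i - 1) 1 :=
          getD_dropLast r (i - 1) (by omega)
        by_cases h2 : r.getD (i - 1) 1 = 0
        · rw [stripIB, if_pos ⟨h1, by rw [hget]; exact h2⟩]
          conv_rhs => rw [stripIB]
          rw [if_pos ⟨h1, h2⟩]
          exact ih (i - 1) (by omega) (by omega)
        · rw [stripIB, if_neg (by rw [hget]; tauto)]
          conv_rhs => rw [stripIB]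
          rw [if_neg (by tauto)]
      · rw [stripIB, if_neg (by tauto)]
        conv_rhs => rw [stripIB]
        rw [if_neg (by tauto)]

lemma strip_eq (r : List Int) : stripA r = r.take (stripIB r r.length) := by
  induction r using stripA.induct with
  | case1 r hcond ih =>
      have hne : r ≠ [] := by intro h; subst h; simp at hcond
      have hlen : r.dropLast.length = r.length - 1 := by simp
      have hlast : r.getD (r.length - 1) 1 = 0 := by
        rw [← getLastD_eq_getD r]; exact hcond.2
      have h1 : stripIB r r.length = stripIB r (r.length - 1) := by
        rw [stripIB, if_pos ⟨hcond.1, hlast⟩]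
      have h2 : stripIB r.dropLast (r.length - 1) = stripIB r (r.length - 1) :=
        stripIB_dropLast r (r.length - 1) (by omega)
      have hk : stripIB r (r.length - 1) ≤ r.length - 1 := stripIB_le r (r.length - 1)
      rw [stripA, if_pos hcond, ih, hlen, h2, h1]
      rw [List.dropLast_eq_take, List.take_take, min_eq_left hk]
  | case2 r hcond =>
      rw [stripA, if_neg hcond]
      cases r with
      | nil => simp [stripIB]
      | cons z t =>
          have : stripIB (z :: t) (z :: t).length = (z :: t).length := by
            rw [stripIB]
            rw [if_neg (by rw [← getLastD_eq_getD (z :: t)]; exact hcond)]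
          rw [this, List.take_length]

-- ===== VERDICT (by name: the statement is the Claim_ definition above) =====
theorem sub_abs_py_spec : Claim_equal_sub_abs_py := by
  intro a b _
  unfold Spec_sub_abs_py sub_abs_py sub_abs_py_alt
  have h0 : subLoopA a b 0 =
      ((diffB a b).zip (negsB (diffB a b) false)).map
        (fun p => p.1 - p.2 + (if p.1 - p.2 < 0 then 10 else 0)) := by
    simpa using loop_eq a b false
  rw [h0, strip_eq]
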